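-- pv_equiv track=rewrite | github.com/gree180160/YJCX_AI | HQSearch/HQHotResult.py | valid_month
-- ===== SOURCE A (Python) =====
-- def valid_month(month_data: list):
--     result = False
--     # 条件1
--     condition1_count = sum(1 for month_value in month_data if month_value < 30) < 3
--     # 条件2
--     condition2_count = sum(1 for month_value in month_data if month_value > 30) >= 8 and sum(
--         1 for month_value in month_data if month_value > 50) >= 7 and sum(
--         1 for month_value in month_data if month_value > 100) >= 3
--
--     # 条件3
--     condition3 = max(month_data[-3:]) > 100
--     # 条件4 -> True
--     condition4 = max(month_data) > 300 and min(month_data[-2:]) > 20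
--     # 条件5 -> False
--     condition5 = max(month_data[-3:]) < 60
--     # 验证条件
--     if condition4:
--         return True
--     if condition5:
--         return False
--     if condition1_count and condition2_count and condition3:
--         result = True
--     return result
-- ===== SOURCE B (Python) =====
-- def valid_month(month_data: list):
--     # one fused pass: four threshold counters, running max, and a sliding
--     # window of the last three values; all slice extrema are then read off
--     # the tiny window instead of re-scanning month_data
--     lt30 = gt30 = gt50 = gt100 = 0
--     overall = None
--     buf = []
--     for v in month_data:
--         if v < 30:
--             lt30 += 1
--         if v > 30:
--             gt30 += 1
--         if v > 50:
--             gt50 += 1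
--         if v > 100:
--             gt100 += 1
--         if overall is None or v > overall:
--             overall = v
--         buf = (buf + [v])[-3:]
--     tail3_max = max(buf)          # == max(month_data[-3:]); raises ValueError on empty input, like A
--     tail2_min = min(buf[-2:])     # == min(month_data[-2:])
--     if overall > 300 and tail2_min > 20:
--         return True
--     if tail3_max < 60:
--         return False
--     return lt30 < 3 and gt30 >= 8 and gt50 >= 7 and gt100 >= 3 and tail3_max > 100
-- ===== Notes on version B (the rewrite author's own statement) =====
-- stated objective: alternative
-- what changed: B replaces A's seven separate traversals (four counting comprehensions plus max(month_data), max(month_data[-3:]), min(month_data[-2:])) with one fused loop maintaining four threshold counters, a running maximum and a sliding window of the last three values, from which the slice extrema are read off at the end.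
-- outside the precondition, e.g. on valid_month([]): A raises ValueError, B raises ValueError
import Mathlib
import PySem

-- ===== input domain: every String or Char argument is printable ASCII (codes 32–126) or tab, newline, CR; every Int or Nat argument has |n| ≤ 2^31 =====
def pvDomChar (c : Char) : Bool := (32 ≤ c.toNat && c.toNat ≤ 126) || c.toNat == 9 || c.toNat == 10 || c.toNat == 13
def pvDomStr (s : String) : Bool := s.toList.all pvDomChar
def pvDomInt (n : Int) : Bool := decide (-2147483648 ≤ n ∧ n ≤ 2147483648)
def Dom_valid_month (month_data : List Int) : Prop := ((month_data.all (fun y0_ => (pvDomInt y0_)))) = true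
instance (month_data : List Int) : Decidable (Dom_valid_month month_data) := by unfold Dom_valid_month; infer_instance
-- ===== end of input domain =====

-- B fuses A's four counting comprehensions and three whole-list scans (max, max of last 3,
-- min of last 2) into one pass keeping four counters, a running max and a 3-element window;
-- objective: alternative single-traversal decomposition. Both A and B raise ValueError on [].

-- ===== PORT A =====
def valid_month (month_data : List Int) : Bool :=
  let condition1_count :=
    decide ((((month_data.filter (fun v => decide (v < 30))).map (fun _ => (1:Int))).sum) < 3)
  let condition2_count :=
    decide ((((month_data.filter (fun v => decide (v > 30))).map (fun _ => (1:Int))).sum) ≥ 8) &&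
    decide ((((month_data.filter (fun v => decide (v > 50))).map (fun _ => (1:Int))).sum) ≥ 7) &&
    decide ((((month_data.filter (fun v => decide (v > 100))).map (fun _ => (1:Int))).sum) ≥ 3)
  match PySem.List.max? (PySem.List.slice month_data (some (-3)) none) (fun y => y),
        PySem.List.max? month_data (fun y => y),
        PySem.List.min? (PySem.List.slice month_data (some (-2)) none) (fun y => y) with
  | some m3, some mAll, some m2 =>
    let condition3 := decide (m3 > 100)
    let condition4 := decide (mAll > 300) && decide (m2 > 20)
    let condition5 := decide (m3 < 60)
    if condition4 then true
    else if condition5 then false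
    else if condition1_count && condition2_count && condition3 then true
    else false
  | _, _, _ => false    -- unreachable under Pre_: max/min of an empty list raise in Python

-- ===== PORT B =====
-- the fused loop state: (lt30, gt30, gt50, gt100, overall running max, window of last ≤3)
def vmStep (s : Int × Int × Int × Int × Option Int × List Int) (v : Int) :
    Int × Int × Int × Int × Option Int × List Int :=
  ((if v < 30 then s.1 + 1 else s.1),
   (if v > 30 then s.2.1 + 1 else s.2.1),
   (if v > 50 then s.2.2.1 + 1 else s.2.2.1),
   (if v > 100 then s.2.2.2.1 + 1 else s.2.2.2.1),
   (match s.2.2.2.2.1 with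
    | none => some v
    | some o => some (if v > o then v else o)),
   PySem.List.slice (s.2.2.2.2.2 ++ [v]) (some (-3)) none)

def valid_month_alt (month_data : List Int) : Bool :=
  let s := month_data.foldl vmStep (0, 0, 0, 0, none, [])
  match PySem.List.max? s.2.2.2.2.2 (fun y => y) with
  | none => false    -- unreachable under Pre_: max(buf) raises on empty input
  | some tail3Max =>
    match PySem.List.min? (PySem.List.slice s.2.2.2.2.2 (some (-2)) none) (fun y => y) with
    | none => false
    | some tail2Min =>
      match s.2.2.2.2.1 with
      | none => false
      | some overall =>
        if decide (overall > 300) && decide (tail2Min > 20) then true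
        else if decide (tail3Max < 60) then false
        else decide (s.1 < 3) && decide (s.2.1 ≥ 8) && decide (s.2.2.1 ≥ 7) &&
             decide (s.2.2.2.1 ≥ 3) && decide (tail3Max > 100)

-- ===== PRECONDITION & SPEC =====
-- Pre_ excludes exactly the empty list, where both Pythons raise ValueError (max of empty sequence).
def Pre_valid_month (month_data : List Int) : Prop := month_data ≠ []
instance (month_data : List Int) : Decidable (Pre_valid_month month_data) := by
  unfold Pre_valid_month; infer_instance
def pvWitness_valid_month : List Int := ([101, 250, 99])

def Spec_valid_month (month_data : List Int) (out : Bool) : Prop := out = valid_month_alt month_data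
instance (month_data : List Int) (out : Bool) : Decidable (Spec_valid_month month_data out) := by
  unfold Spec_valid_month; infer_instance

-- ===== CLAIM (what is proved, stated in full; the proofs are below) =====
def Claim_equal_valid_month : Prop := ∀ (month_data : List Int), Dom_valid_month month_data → Pre_valid_month month_data → Spec_valid_month month_data (valid_month month_data)

-- ===== LEMMAS AND PROOFS =====

-- the last-three window of xs ++ [v], from the last-three window of xs
lemma window_snoc (xs : List Int) (v : Int) :
    PySem.List.slice (PySem.List.slice xs (some (-3)) none ++ [v]) (some (-3)) none
      = PySem.List.slice (xs ++ [v]) (some (-3)) none := by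
  rw [PySem.List.slice_from_neg_ofNat _ 3 (by omega),
      PySem.List.slice_from_neg_ofNat _ 3 (by omega),
      PySem.List.slice_from_neg_ofNat _ 3 (by omega)]
  rcases Nat.lt_or_ge xs.length 3 with h | h
  · rw [show xs.length - 3 = 0 from by omega, List.drop_zero]
  · rw [show (List.drop (xs.length - 3) xs ++ [v]).length - 3 = 1 from by
        simp [List.length_drop]; omega]
    rw [List.drop_append_of_le_length (by simp [List.length_drop]; omega),
        List.drop_drop,
        List.drop_append_of_le_length (by simp)]
    congr 2
    simp
    omega

-- the last-two suffix of the last-three window is the last-two suffix of the list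
lemma window_tail2 (xs : List Int) :
    PySem.List.slice (PySem.List.slice xs (some (-3)) none) (some (-2)) none
      = PySem.List.slice xs (some (-2)) none := by
  rw [PySem.List.slice_from_neg_ofNat _ 3 (by omega),
      PySem.List.slice_from_neg_ofNat _ 2 (by omega),
      PySem.List.slice_from_neg_ofNat _ 2 (by omega),
      List.drop_drop]
  congr 1
  rw [List.length_drop]
  omega

-- running max step agrees with Int.max
lemma step_max (o v : Int) : (if v > o then v else o) = max o v := by
  rcases le_or_gt v o with h | h <;> simp [max_def] <;> omega

-- the fused fold computes the four counts, the running max and the last-three window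
lemma fold_spec (xs : List Int) :
    xs.foldl vmStep (0, 0, 0, 0, none, []) =
      ((List.countP (fun v => decide (v < 30)) xs : Int),
       (List.countP (fun v => decide (v > 30)) xs : Int),
       (List.countP (fun v => decide (v > 50)) xs : Int),
       (List.countP (fun v => decide (v > 100)) xs : Int),
       PySem.List.max? xs (fun y => y),
       PySem.List.slice xs (some (-3)) none) := by
  induction xs using List.reverseRecOn with
  | nil => rfl
  | append_singleton xs v ih =>
    rw [List.foldl_append, ih]
    have hmax : PySem.List.max? (xs ++ [v]) (fun y => y) =
        (match PySem.List.max? xs (fun y => y) with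
         | none => some v
         | some o => some (if v > o then v else o)) := by
      cases xs with
      | nil => rfl
      | cons y t =>
        rw [List.cons_append, PySem.List.max?_id_cons, PySem.List.max?_id_cons]
        simp [List.foldl_append, step_max]
    unfold vmStep
    simp only [List.foldl_cons, List.foldl_nil, List.countP_append, window_snoc, hmax]
    simp [List.countP_cons]
    refine ⟨?_, ?_, ?_, ?_⟩ <;> split_ifs <;> simp_all

-- a Python 0/1-generator sum over a filter is a count
lemma sum_filter_ones (p : Int → Bool) (xs : List Int) :
    ((xs.filter p).map (fun _ => (1:Int))).sum = (List.countP p xs : Int) := by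
  simp [List.map_const', List.sum_replicate, List.countP_eq_length_filter]

-- ===== VERDICT (by name: the statement is the Claim_ definition above) =====
theorem valid_month_spec : Claim_equal_valid_month := by
  intro xs _ hpre
  unfold Spec_valid_month valid_month valid_month_alt
  rw [fold_spec]
  simp only [sum_filter_ones, window_tail2]
  rcases h3 : PySem.List.max? (PySem.List.slice xs (some (-3)) none) (fun y => y) with _ | m3
  · exfalso
    rw [PySem.List.max?_eq_none_iff] at h3
    rw [PySem.List.slice_from_neg_ofNat _ 3 (by omega), List.drop_eq_nil_iff] at h3
    exact hpre (List.length_eq_zero_iff.mp (by omega))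
  · rcases hA : PySem.List.max? xs (fun y => y) with _ | mAll
    · rw [PySem.List.max?_eq_none_iff] at hA; exact absurd hA hpre
    · rcases h2 : PySem.List.min? (PySem.List.slice xs (some (-2)) none) (fun y => y) with _ | m2
      · exfalso
        rw [PySem.List.min?_eq_none_iff] at h2
        rw [PySem.List.slice_from_neg_ofNat _ 2 (by omega), List.drop_eq_nil_iff] at h2
        exact hpre (List.length_eq_zero_iff.mp (by omega))
      · simp only []
        split_ifs <;> simp_all [Bool.and_assoc]
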